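-- pv_equiv track=rewrite | github.com/yuriangelperez/Portafolio-aprendizaje | PythonAprendizaje/binomio_de_newton.py | generar_termino
-- ===== SOURCE A (Python) =====
-- def generar_termino(coef, var1, exp1, var2, exp2):
--     letras = ""
--     if exp1 > 0:
--         letras += var1 * exp1
--     if exp2 > 0:
--         letras += var2 * exp2
--
--     if letras == "":
--         return str(coef)
--
--     letras_contadas = {}
--     for letra in letras:
--         letras_contadas[letra] = letras_contadas.get(letra, 0) + 1
--
--     texto = str(coef)
--     for letra in sorted(letras_contadas):
--         exp = letras_contadas[letra]
--         if exp == 1: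
--             texto += letra
--         else:
--             texto += letra + "^" + str(exp)
--
--     return texto
-- ===== SOURCE B (Python) =====
-- def generar_termino(coef, var1, exp1, var2, exp2):
--     # Build the per-letter exponent table directly: each character of a
--     # variable contributes its whole exponent at once, instead of
--     # materialising the string var * exp and counting single occurrences.
--     counts = {}
--     if exp1 > 0:
--         for c in var1:
--             counts[c] = counts.get(c, 0) + exp1
--     if exp2 > 0:
--         for c in var2:
--             counts[c] = counts.get(c, 0) + exp2
--
--     if not counts:
--         return str(coef)
--
--     texto = str(coef)
--     for letra in sorted(counts):
--         exp = counts[letra]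
--         if exp == 1:
--             texto += letra
--         else:
--             texto += letra + "^" + str(exp)
--     return texto
-- ===== Notes on version B (the rewrite author's own statement) =====
-- stated objective: alternative
-- what changed: B never materialises the expanded string var*exp: it builds the per-letter exponent dict directly, adding each variable's whole exponent per character, and decides the empty case from the dict instead of the expanded string.
import Mathlib
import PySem

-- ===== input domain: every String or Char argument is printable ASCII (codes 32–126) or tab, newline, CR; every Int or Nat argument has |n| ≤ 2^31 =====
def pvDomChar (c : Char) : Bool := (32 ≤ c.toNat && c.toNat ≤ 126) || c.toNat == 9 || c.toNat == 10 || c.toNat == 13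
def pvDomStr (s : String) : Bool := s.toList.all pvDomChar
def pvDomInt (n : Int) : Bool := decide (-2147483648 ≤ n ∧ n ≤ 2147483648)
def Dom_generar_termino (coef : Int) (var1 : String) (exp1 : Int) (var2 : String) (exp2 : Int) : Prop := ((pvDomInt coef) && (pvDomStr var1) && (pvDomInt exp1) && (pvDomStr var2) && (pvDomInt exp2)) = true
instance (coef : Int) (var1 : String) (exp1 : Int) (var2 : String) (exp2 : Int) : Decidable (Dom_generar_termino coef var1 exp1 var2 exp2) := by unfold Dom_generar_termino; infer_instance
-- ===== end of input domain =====

-- B builds the per-letter exponent dict directly (each character contributes its whole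
-- exponent at once) instead of materialising var*exp and counting single occurrences;
-- objective: alternative (avoids building the expanded string).

-- ===== PORT A =====
-- 'var1 * exp1' (exp1 > 0) = the character list of var1 repeated exp1 times
def generar_termino (coef : Int) (var1 : String) (exp1 : Int) (var2 : String) (exp2 : Int) : String :=
  let letras : List Char :=
    (if exp1 > 0 then (List.replicate exp1.toNat var1.toList).flatten else []) ++
    (if exp2 > 0 then (List.replicate exp2.toNat var2.toList).flatten else [])
  if letras = [] then PySem.Int.toStr coef
  else
    let letras_contadas : PySem.Dict Char Int :=
      letras.foldl (fun d letra => d.insert letra (d.getD letra 0 + 1)) (PySem.Dict.empty : PySem.Dict Char Int)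
    -- letras_contadas[letra]: letra comes from the dict's own keys, so getD _ 0 is exact
    (PySem.List.sorted letras_contadas.keys (fun x => x) false).foldl
      (fun texto letra =>
        let exp := letras_contadas.getD letra 0
        if exp = 1 then texto ++ String.ofList [letra]
        else texto ++ String.ofList [letra] ++ "^" ++ PySem.Int.toStr exp)
      (PySem.Int.toStr coef)

-- ===== PORT B =====
def generar_termino_alt (coef : Int) (var1 : String) (exp1 : Int) (var2 : String) (exp2 : Int) : String :=
  let counts0 : PySem.Dict Char Int :=
    if exp1 > 0 then
      var1.toList.foldl (fun d c => d.insert c (d.getD c 0 + exp1)) PySem.Dict.empty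
    else PySem.Dict.empty
  let counts : PySem.Dict Char Int :=
    if exp2 > 0 then
      var2.toList.foldl (fun d c => d.insert c (d.getD c 0 + exp2)) counts0
    else counts0
  if counts.items = [] then PySem.Int.toStr coef
  else
    (PySem.List.sorted counts.keys (fun x => x) false).foldl
      (fun texto letra =>
        let exp := counts.getD letra 0
        if exp = 1 then texto ++ String.ofList [letra]
        else texto ++ String.ofList [letra] ++ "^" ++ PySem.Int.toStr exp)
      (PySem.Int.toStr coef)

-- ===== PRECONDITION & SPEC =====
def Spec_generar_termino (coef : Int) (var1 : String) (exp1 : Int) (var2 : String) (exp2 : Int) (out : String) : Prop := out = generar_termino_alt coef var1 exp1 var2 exp2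
instance (coef : Int) (var1 : String) (exp1 : Int) (var2 : String) (exp2 : Int) (out : String) : Decidable (Spec_generar_termino coef var1 exp1 var2 exp2 out) := by unfold Spec_generar_termino; infer_instance

-- ===== CLAIM (what is proved, stated in full; the proofs are below) =====
def Claim_equal_generar_termino : Prop := ∀ (coef : Int) (var1 : String) (exp1 : Int) (var2 : String) (exp2 : Int), Dom_generar_termino coef var1 exp1 var2 exp2 → Spec_generar_termino coef var1 exp1 var2 exp2 (generar_termino coef var1 exp1 var2 exp2)

-- ===== LEMMAS AND PROOFS =====

-- getD after B's constant-increment loop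
theorem pv_getD_foldl_insert_add_const (xs : List Char) (e : Int) (d : PySem.Dict Char Int) (a : Char) :
    (xs.foldl (fun d c => d.insert c (d.getD c 0 + e)) d).getD a 0
      = d.getD a 0 + (xs.count a : Int) * e := by
  induction xs generalizing d with
  | nil => simp
  | cons x xs ih =>
    simp only [List.foldl_cons, ih, PySem.Dict.getD_insert, List.count_cons]
    by_cases h : a = x
    · simp [h]; ring
    · simp [h, Ne.symm h]

-- keys after B's constant-increment loop
theorem pv_keys_foldl_insert_add_const (xs : List Char) (e : Int) (d : PySem.Dict Char Int) :
    (xs.foldl (fun d c => d.insert c (d.getD c 0 + e)) d).keys = PySem.Set.update d.keys xs :=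
  PySem.Dict.keys_foldl_insert xs (fun d c => d.getD c 0 + e) d

-- the shared core: A's expanded-string counter and B's multiplied counter produce the same text
theorem pv_core (coef e1 e2 : Int) (f1 f2 l1 l2 : List Char)
    (hc1 : ∀ a, ((f1.count a : Int)) = (l1.count a : Int) * e1)
    (hc2 : ∀ a, ((f2.count a : Int)) = (l2.count a : Int) * e2)
    (hm1 : ∀ a, a ∈ f1 ↔ a ∈ l1) (hm2 : ∀ a, a ∈ f2 ↔ a ∈ l2) :
    (if f1 ++ f2 = [] then PySem.Int.toStr coef
     else
       (PySem.List.sorted ((f1 ++ f2).foldl (fun d letra => d.insert letra (d.getD letra 0 + 1)) (PySem.Dict.empty : PySem.Dict Char Int)).keys (fun x => x) false).foldl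
         (fun texto letra =>
           if ((f1 ++ f2).foldl (fun d letra => d.insert letra (d.getD letra 0 + 1)) (PySem.Dict.empty : PySem.Dict Char Int)).getD letra 0 = 1 then texto ++ String.ofList [letra]
           else texto ++ String.ofList [letra] ++ "^" ++ PySem.Int.toStr (((f1 ++ f2).foldl (fun d letra => d.insert letra (d.getD letra 0 + 1)) (PySem.Dict.empty : PySem.Dict Char Int)).getD letra 0))
         (PySem.Int.toStr coef))
    =
    (if (l2.foldl (fun d c => d.insert c (d.getD c 0 + e2)) (l1.foldl (fun d c => d.insert c (d.getD c 0 + e1)) PySem.Dict.empty)).items = [] then PySem.Int.toStr coef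
     else
       (PySem.List.sorted (l2.foldl (fun d c => d.insert c (d.getD c 0 + e2)) (l1.foldl (fun d c => d.insert c (d.getD c 0 + e1)) PySem.Dict.empty)).keys (fun x => x) false).foldl
         (fun texto letra =>
           if (l2.foldl (fun d c => d.insert c (d.getD c 0 + e2)) (l1.foldl (fun d c => d.insert c (d.getD c 0 + e1)) PySem.Dict.empty)).getD letra 0 = 1 then texto ++ String.ofList [letra]
           else texto ++ String.ofList [letra] ++ "^" ++ PySem.Int.toStr ((l2.foldl (fun d c => d.insert c (d.getD c 0 + e2)) (l1.foldl (fun d c => d.insert c (d.getD c 0 + e1)) PySem.Dict.empty)).getD letra 0))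
         (PySem.Int.toStr coef)) := by
  set dA := (f1 ++ f2).foldl (fun d letra => d.insert letra (d.getD letra 0 + 1)) (PySem.Dict.empty : PySem.Dict Char Int) with hdA
  set dB := l2.foldl (fun d c => d.insert c (d.getD c 0 + e2)) (l1.foldl (fun d c => d.insert c (d.getD c 0 + e1)) PySem.Dict.empty) with hdB
  have hdAc : dA = PySem.Dict.counter (f1 ++ f2) := by
    rw [hdA, PySem.Dict.foldl_insert_getD_add_one_eq_counter]
  have hgA : ∀ a, dA.getD a 0 = ((f1 ++ f2).count a : Int) := by
    intro a; rw [hdAc, PySem.Dict.getD_counter]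
  have hkA : dA.keys = PySem.Set.ofList (f1 ++ f2) := by
    rw [hdAc, PySem.Dict.keys_counter]
  have hgB : ∀ a, dB.getD a 0 = (l1.count a : Int) * e1 + (l2.count a : Int) * e2 := by
    intro a
    rw [hdB, pv_getD_foldl_insert_add_const, pv_getD_foldl_insert_add_const,
        PySem.Dict.getD_empty]
    ring
  have hkB : dB.keys = PySem.Set.update (PySem.Set.update (PySem.Dict.empty : PySem.Dict Char Int).keys l1) l2 := by
    rw [hdB, pv_keys_foldl_insert_add_const, pv_keys_foldl_insert_add_const]
  have hg : ∀ a, dA.getD a 0 = dB.getD a 0 := by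
    intro a
    rw [hgA, hgB, List.count_append, ← hc1, ← hc2]
    push_cast; ring
  have hmem : ∀ a, a ∈ dA.keys ↔ a ∈ dB.keys := by
    intro a
    rw [hkA, hkB]
    simp [PySem.Set.mem_ofList, PySem.Set.mem_update, PySem.Dict.keys_empty, hm1 a, hm2 a]
  have hempty : (f1 ++ f2 = []) ↔ dB.items = [] := by
    constructor
    · intro h
      have : dB.keys = [] := by
        rw [List.eq_nil_iff_forall_not_mem]
        intro a ha
        have := (hmem a).mpr ha
        rw [hkA, PySem.Set.mem_ofList, h] at this
        simp at this
      have : dB.items.map Prod.fst = [] := this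
      exact List.map_eq_nil_iff.mp this
    · intro h
      rw [List.eq_nil_iff_forall_not_mem]
      intro a ha
      have : a ∈ dA.keys := by rw [hkA, PySem.Set.mem_ofList]; exact ha
      have hb := (hmem a).mp this
      have : dB.keys = [] := by
        show dB.items.map Prod.fst = []
        rw [h]; rfl
      rw [this] at hb
      simp at hb
  have hnodA : dA.keys.Nodup := by rw [hkA]; exact PySem.Set.nodup_ofList _
  have hnodB : dB.keys.Nodup := by
    rw [hkB]
    exact PySem.Set.nodup_update _ _ (PySem.Set.nodup_update _ _ List.nodup_nil)
  have hperm : dA.keys.Perm dB.keys := (List.perm_ext_iff_of_nodup hnodA hnodB).mpr hmem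
  have hsorted : PySem.List.sorted dA.keys (fun x => x) false
      = PySem.List.sorted dB.keys (fun x => x) false :=
    PySem.List.sorted_eq_sorted_of_perm dA.keys dB.keys (fun x => x) (fun _ _ h => h) hperm
  have hfun : (fun (texto : String) (letra : Char) =>
      if dA.getD letra 0 = 1 then texto ++ String.ofList [letra]
      else texto ++ String.ofList [letra] ++ "^" ++ PySem.Int.toStr (dA.getD letra 0))
      = (fun (texto : String) (letra : Char) =>
      if dB.getD letra 0 = 1 then texto ++ String.ofList [letra]
      else texto ++ String.ofList [letra] ++ "^" ++ PySem.Int.toStr (dB.getD letra 0)) := by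
    funext texto letra; rw [hg letra]
  split_ifs with h h' h'
  · rfl
  · exact absurd (hempty.mp h) h'
  · exact absurd (hempty.mpr h') h
  · rw [hsorted, hfun]

theorem pv_count_rep (n : Nat) (l : List Char) (e : Int) (he : (n : Int) = e) (a : Char) :
    (((List.replicate n l).flatten.count a : Int)) = (l.count a : Int) * e := by
  rw [← he]
  simp [List.count_flatten, List.map_replicate]
  ring

theorem pv_mem_rep (n : Nat) (l : List Char) (hn : n ≠ 0) (a : Char) :
    a ∈ (List.replicate n l).flatten ↔ a ∈ l := by
  simp [List.mem_flatten, List.mem_replicate, hn]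

theorem pv_count_nil (e : Int) (a : Char) :
    ((([] : List Char).count a : Int)) = (([] : List Char).count a : Int) * e := by simp

theorem pv_toNat_cast (e : Int) (he : e > 0) : ((e.toNat : Int)) = e := Int.toNat_of_nonneg he.le

theorem pv_toNat_ne (e : Int) (he : e > 0) : e.toNat ≠ 0 := by
  simp [Int.toNat_eq_zero]; omega

theorem generar_termino_spec : Claim_equal_generar_termino := by
  intro coef var1 exp1 var2 exp2 _
  unfold Spec_generar_termino generar_termino generar_termino_alt
  by_cases h1 : exp1 > 0 <;> by_cases h2 : exp2 > 0
  · simp only [if_pos h1, if_pos h2]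
    exact pv_core coef exp1 exp2 _ _ var1.toList var2.toList
      (pv_count_rep _ _ _ (pv_toNat_cast _ h1)) (pv_count_rep _ _ _ (pv_toNat_cast _ h2))
      (pv_mem_rep _ _ (pv_toNat_ne _ h1)) (pv_mem_rep _ _ (pv_toNat_ne _ h2))
  · simp only [if_pos h1, if_neg h2]
    exact pv_core coef exp1 exp2 _ [] var1.toList []
      (pv_count_rep _ _ _ (pv_toNat_cast _ h1)) (pv_count_nil _)
      (pv_mem_rep _ _ (pv_toNat_ne _ h1)) (fun a => Iff.rfl)
  · simp only [if_neg h1, if_pos h2]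
    exact pv_core coef exp1 exp2 [] _ [] var2.toList
      (pv_count_nil _) (pv_count_rep _ _ _ (pv_toNat_cast _ h2))
      (fun a => Iff.rfl) (pv_mem_rep _ _ (pv_toNat_ne _ h2))
  · simp only [if_neg h1, if_neg h2]
    exact pv_core coef exp1 exp2 [] [] [] []
      (pv_count_nil _) (pv_count_nil _) (fun a => Iff.rfl) (fun a => Iff.rfl)
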